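-- pv_equiv track=rewrite | github.com/pypi-data/pypi-mirror-314 | packages/janito/janito-0.5.0.tar.gz/janito-0.5.0/janito/_contextparser.py | parse_change_block
-- ===== SOURCE A (Python) =====
-- from typing import List, Tuple, Optional, NamedTuple
--
-- def parse_change_block(content: str) -> Tuple[List[str], List[str], List[str]]:
--     """Parse a change block into pre-context, post-context and change lines.
--     Returns (pre_context_lines, post_context_lines, change_lines)"""
--     pre_context_lines = []
--     post_context_lines = []
--     change_lines = []
--     in_pre_context = True
--
--     for line in content.splitlines():
--         if line.startswith('='):
--             if in_pre_context:
--                 pre_context_lines.append(line[1:])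
--             else:
--                 post_context_lines.append(line[1:])
--         elif line.startswith('>'):
--             in_pre_context = False
--             change_lines.append(line[1:])
--
--     return pre_context_lines, post_context_lines, change_lines
-- ===== SOURCE B (Python) =====
-- def parse_change_block(content):
--     """Parse a change block into pre-context, post-context and change lines.
--     Returns (pre_context_lines, post_context_lines, change_lines)"""
--     lines = content.splitlines()
--     split = next((i for i, l in enumerate(lines) if l.startswith('>')), len(lines))
--     pre_context_lines = [l[1:] for l in lines[:split] if l.startswith('=')]
--     post_context_lines = [l[1:] for l in lines[split:] if l.startswith('=')]
--     change_lines = [l[1:] for l in lines if l.startswith('>')]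
--     return pre_context_lines, post_context_lines, change_lines
-- ===== Notes on version B (the rewrite author's own statement) =====
-- stated objective: simpler
-- what changed: Replaced A's single stateful loop with a running in_pre_context flag by computing the pivot index of the first '>' line and building the three result lists with slice-partitioned filter/map passes.
import Mathlib
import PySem

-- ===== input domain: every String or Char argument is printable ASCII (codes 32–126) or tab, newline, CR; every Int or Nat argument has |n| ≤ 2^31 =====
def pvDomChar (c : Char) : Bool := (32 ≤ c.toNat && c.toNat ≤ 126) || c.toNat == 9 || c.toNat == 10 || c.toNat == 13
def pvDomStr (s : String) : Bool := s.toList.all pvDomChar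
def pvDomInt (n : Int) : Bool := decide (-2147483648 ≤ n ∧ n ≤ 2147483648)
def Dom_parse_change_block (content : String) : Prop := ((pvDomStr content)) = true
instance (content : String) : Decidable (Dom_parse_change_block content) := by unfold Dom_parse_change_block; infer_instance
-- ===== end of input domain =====

-- B replaces A's running in_pre_context flag by a single pivot index (first '>' line) and three slice/filter passes; objective: simpler decomposition, same cost.

-- ===== PORT A =====
-- line[1:]
def pvTail1 (line : String) : String := PySem.Str.slice line (some 1) none

-- one iteration of A's for-loop over (pre, post, change, in_pre_context)
def pvStepA (st : List String × List String × List String × Bool) (line : String) :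
    List String × List String × List String × Bool :=
  let (pre, post, ch, inPre) := st
  if PySem.Str.startswith line "=" then
    if inPre then (pre ++ [pvTail1 line], post, ch, inPre)
    else (pre, post ++ [pvTail1 line], ch, inPre)
  else if PySem.Str.startswith line ">" then
    (pre, post, ch ++ [pvTail1 line], false)
  else (pre, post, ch, inPre)

def parse_change_block (content : String) : List String × List String × List String :=
  let r := (PySem.Str.splitlines content).foldl pvStepA ([], [], [], true)
  (r.1, r.2.1, r.2.2.1)

-- ===== PORT B =====
def parse_change_block_alt (content : String) : List String × List String × List String :=
  let lines := PySem.Str.splitlines content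
  let split := lines.findIdx (fun l => PySem.Str.startswith l ">")
  let pre := ((lines.take split).filter (fun l => PySem.Str.startswith l "=")).map pvTail1
  let post := ((lines.drop split).filter (fun l => PySem.Str.startswith l "=")).map pvTail1
  let ch := (lines.filter (fun l => PySem.Str.startswith l ">")).map pvTail1
  (pre, post, ch)

-- ===== PRECONDITION & SPEC =====
def Spec_parse_change_block (content : String) (out : List String × List String × List String) : Prop := out = parse_change_block_alt content
instance (content : String) (out : List String × List String × List String) : Decidable (Spec_parse_change_block content out) := by unfold Spec_parse_change_block; infer_instance

-- ===== CLAIM (what is proved, stated in full; the proofs are below) =====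
def Claim_equal_parse_change_block : Prop := ∀ (content : String), Dom_parse_change_block content → Spec_parse_change_block content (parse_change_block content)

-- ===== LEMMAS AND PROOFS =====

-- a line cannot start with both '=' and '>'
theorem pvNotBoth (l : String) (he : PySem.Chars.startswith l.toList ['='] = true) :
    PySem.Chars.startswith l.toList ['>'] = false := by
  rcases (PySem.Chars.startswith_iff _ _).mp he with ⟨u, hu⟩
  by_contra hgt
  rcases (PySem.Chars.startswith_iff _ _).mp (by simpa using hgt) with ⟨v, hv⟩
  have h2 := hu.trans hv.symm
  simp at h2

-- after the flag has flipped, '=' lines go to post and '>' lines keep appending to change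
theorem pvFoldFalse (ls : List String) (pre post ch : List String) :
    ls.foldl pvStepA (pre, post, ch, false) =
      (pre,
       post ++ ((ls.filter (fun l => PySem.Str.startswith l "=")).map pvTail1),
       ch ++ ((ls.filter (fun l => PySem.Str.startswith l ">")).map pvTail1),
       false) := by
  induction ls generalizing post ch with
  | nil => simp
  | cons h t ih =>
    by_cases he : PySem.Chars.startswith h.toList ['='] = true
    · have hg := pvNotBoth h he
      simp [pvStepA, he, hg, ih]
    · by_cases hg : PySem.Chars.startswith h.toList ['>'] = true
      · simp [pvStepA, he, hg, ih]
      · simp [pvStepA, he, hg, ih]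

-- while the flag is still true, the result splits at the first '>' line
theorem pvFoldTrue (ls : List String) (pre post ch : List String) :
    ls.foldl pvStepA (pre, post, ch, true) =
      (pre ++ (((ls.take (ls.findIdx (fun l => PySem.Str.startswith l ">"))).filter
                 (fun l => PySem.Str.startswith l "=")).map pvTail1),
       post ++ (((ls.drop (ls.findIdx (fun l => PySem.Str.startswith l ">"))).filter
                 (fun l => PySem.Str.startswith l "=")).map pvTail1),
       ch ++ ((ls.filter (fun l => PySem.Str.startswith l ">")).map pvTail1),
       decide (ls.findIdx (fun l => PySem.Str.startswith l ">") = ls.length)) := by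
  induction ls generalizing pre ch with
  | nil => simp
  | cons h t ih =>
    by_cases hg : PySem.Chars.startswith h.toList ['>'] = true
    · have he : PySem.Chars.startswith h.toList ['='] = false := by
        by_contra hc
        have := pvNotBoth h (by simpa using hc)
        simp [hg] at this
      simp [pvStepA, he, hg, List.findIdx_cons, pvFoldFalse]
    · by_cases he : PySem.Chars.startswith h.toList ['='] = true
      · simp [pvStepA, he, hg, ih, List.findIdx_cons]
      · simp [pvStepA, he, hg, ih, List.findIdx_cons]

-- ===== VERDICT (by name: the statement is the Claim_ definition above) =====
theorem parse_change_block_spec : Claim_equal_parse_change_block := by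
  intro content _
  unfold Spec_parse_change_block parse_change_block parse_change_block_alt
  simp [pvFoldTrue]
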